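-- pv_equiv track=rewrite | github.com/python/mypy | mypy/junit.py | _group_messages_by_file_path
-- ===== SOURCE A (Python) =====
-- from typing import List
-- from typing import MutableMapping
--
-- def _group_messages_by_file_path(messages: List[str]) -> MutableMapping[str, List[str]]:
--     groups = {}  # type: MutableMapping[str, List[str]]
--
--     for message in messages:
--         if ':' not in message:
--             continue
--
--         file_path = message.split(':', 1)[0]
--
--         if file_path not in groups:
--             groups[file_path] = list()
--         groups[file_path].append(message)
--
--     return groups
-- ===== SOURCE B (Python) =====
-- def _group_messages_by_file_path(messages):
--     keyed = [(m.split(':', 1)[0], m) for m in messages if ':' in m]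
--     keys = list(dict.fromkeys(k for k, _ in keyed))
--     return {k: [m for kk, m in keyed if kk == k] for k in keys}
-- ===== Notes on version B (the rewrite author's own statement) =====
-- stated objective: alternative
-- what changed: Replaces A's single pass that mutates a dict (ensure-key-then-append) with a filter/dedup/gather decomposition: pair each ':'-message with its key, dedup keys in first-appearance order, then build each group with a comprehension filtering the keyed pairs.
import Mathlib
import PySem

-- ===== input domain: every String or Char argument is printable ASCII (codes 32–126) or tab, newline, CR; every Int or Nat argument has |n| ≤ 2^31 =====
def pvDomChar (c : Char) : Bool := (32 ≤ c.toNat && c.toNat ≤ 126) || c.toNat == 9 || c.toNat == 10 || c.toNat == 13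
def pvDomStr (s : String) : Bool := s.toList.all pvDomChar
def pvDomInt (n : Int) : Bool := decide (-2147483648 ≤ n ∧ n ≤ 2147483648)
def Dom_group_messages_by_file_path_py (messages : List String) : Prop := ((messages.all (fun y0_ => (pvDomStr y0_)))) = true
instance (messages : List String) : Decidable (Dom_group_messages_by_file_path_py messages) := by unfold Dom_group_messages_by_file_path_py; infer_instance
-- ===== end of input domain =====

-- B replaces A's mutate-a-dict-in-a-loop with a filter/dedup/gather decomposition:
-- pair each ':'-message with its key, dedup the keys in first-appearance order, and
-- build each group by one filter pass; same return value, objective: alternative.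

-- message.split(':', 1)[0]; exact: sep ":" ≠ "" (splitMax? is some) and a split result is never empty
def pvKeyOf (m : String) : String := (((PySem.Str.splitMax? m ":" 1).getD []).headD "")

-- ===== PORT A =====
def group_messages_by_file_path_py (messages : List String) : List (String × List String) :=
  (messages.foldl (fun groups message =>
    if PySem.Str.isIn ":" message = false then groups
    else
      let file_path := pvKeyOf message
      let groups := if groups.contains file_path = false then groups.insert file_path [] else groups
      groups.modify file_path [] (fun v => v ++ [message]))
    PySem.Dict.empty).items

-- ===== PORT B =====
def group_messages_by_file_path_py_alt (messages : List String) : List (String × List String) :=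
  let keyed := (messages.filter (fun m => PySem.Str.isIn ":" m)).map (fun m => (pvKeyOf m, m))
  let keys := PySem.List.dedup (keyed.map Prod.fst)
  keys.map (fun k => (k, (keyed.filter (fun p => p.1 == k)).map Prod.snd))

-- ===== PRECONDITION & SPEC =====
def Spec_group_messages_by_file_path_py (messages : List String) (out : List (String × List String)) : Prop := out = group_messages_by_file_path_py_alt messages
instance (messages : List String) (out : List (String × List String)) : Decidable (Spec_group_messages_by_file_path_py messages out) := by unfold Spec_group_messages_by_file_path_py; infer_instance

-- ===== CLAIM (what is proved, stated in full; the proofs are below) =====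
def Claim_equal_group_messages_by_file_path_py : Prop := ∀ (messages : List String), Dom_group_messages_by_file_path_py messages → Spec_group_messages_by_file_path_py messages (group_messages_by_file_path_py messages)

-- ===== LEMMAS AND PROOFS =====

-- "ensure key, then append" collapses to a single modify with default []
theorem pv_insert_modify (d : PySem.Dict String (List String)) (k : String) (m : String) :
    ((if d.contains k = false then d.insert k ([] : List String) else d).modify k []
      (fun v => v ++ [m])) = d.modify k [] (fun v => v ++ [m]) := by
  by_cases h : d.contains k = false
  · simp only [h, if_pos, PySem.Dict.modify, PySem.Dict.insert_insert_self,
      PySem.Dict.getD_insert_self, PySem.Dict.getD_of_not_contains d [] h]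
  · simp [h]

-- A's "ensure key, then append" step equals the plain modify step, as functions
theorem pv_step_eq :
    (fun (groups : PySem.Dict String (List String)) (message : String) =>
      if PySem.Str.isIn ":" message = false then groups
      else
        let file_path := pvKeyOf message
        let groups := if groups.contains file_path = false then groups.insert file_path [] else groups
        groups.modify file_path [] (fun v => v ++ [message]))
    = (fun (groups : PySem.Dict String (List String)) (message : String) =>
      if PySem.Str.isIn ":" message = false then groups
      else groups.modify (pvKeyOf message) [] (fun v => v ++ [message])) := by
  funext groups message
  by_cases h : PySem.Str.isIn ":" message = false
  · rw [if_pos h, if_pos h]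
  · rw [if_neg h, if_neg h, pv_insert_modify]

-- A's loop over all messages is the modify-loop over the keyed, filtered pairs
theorem pv_fold_keyed (messages : List String) (d : PySem.Dict String (List String)) :
    messages.foldl (fun groups message =>
      if PySem.Str.isIn ":" message = false then groups
      else groups.modify (pvKeyOf message) [] (fun v => v ++ [message])) d
    = (((messages.filter (fun m => PySem.Str.isIn ":" m)).map (fun m => (pvKeyOf m, m))).foldl
        (fun groups p => groups.modify p.1 [] (fun v => v ++ [p.2])) d) := by
  induction messages generalizing d with
  | nil => rfl
  | cons m ms ih =>
    by_cases h : PySem.Str.isIn ":" m = false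
    · simp only [List.foldl_cons, List.filter_cons, h, if_pos, Bool.false_eq_true, if_false]
      exact ih d
    · simp only [Bool.not_eq_false] at h
      simp only [List.foldl_cons, List.filter_cons, h, Bool.true_eq_false, if_false, if_true,
        List.map_cons]
      exact ih _

theorem group_messages_eq (messages : List String) :
    group_messages_by_file_path_py messages = group_messages_by_file_path_py_alt messages := by
  unfold group_messages_by_file_path_py group_messages_by_file_path_py_alt
  rw [pv_step_eq, pv_fold_keyed]
  set keyed := (messages.filter (fun m => PySem.Str.isIn ":" m)).map (fun m => (pvKeyOf m, m)) with hk
  have hnd : ((keyed.foldl (fun groups p => groups.modify p.1 [] (fun v => v ++ [p.2]))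
      PySem.Dict.empty).keys).Nodup := by
    exact PySem.Dict.nodup_keys_foldl_modify_key keyed Prod.fst []
      (fun d p => fun v => v ++ [p.2]) PySem.Dict.empty PySem.Dict.nodup_keys_empty
  rw [PySem.Dict.items_eq_map_keys _ hnd []]
  have hkeys : (keyed.foldl (fun groups p => groups.modify p.1 [] (fun v => v ++ [p.2]))
      PySem.Dict.empty).keys = PySem.List.dedup (keyed.map Prod.fst) := by
    rw [PySem.Dict.keys_foldl_modify_key keyed Prod.fst []
      (fun d p => fun v => v ++ [p.2]) PySem.Dict.empty]
    simp [PySem.Dict.keys_empty, PySem.List.dedup_eq_ofList, PySem.Set.update,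
      PySem.Set.ofList_eq_foldl]
  rw [hkeys]
  refine List.map_congr_left (fun k _ => ?_)
  rw [PySem.Dict.getD_foldl_modify_append]
  simp [PySem.Dict.getD_empty]

-- ===== VERDICT (by name: the statement is the Claim_ definition above) =====
theorem group_messages_by_file_path_py_spec : Claim_equal_group_messages_by_file_path_py := by
  intro messages _
  exact group_messages_eq messages
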